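-- pv_equiv track=rewrite | github.com/karolina791/rosalind-assignment-2 | LONG/LONG.py | max_overlap
-- ===== SOURCE A (Python) =====
-- from itertools import permutations
--
-- def overlap(seq1, seq2):
--     position=0
--     while True:
--         position=seq1.find(seq2[:1], position)
--         if position==-1:
--             return 0
--
--         if seq2.startswith(seq1[position:]):
--             return len(seq1)-position
--         position += 1
--
-- def max_overlap(seq_list):
--     match1= 0
--     m_seq1= ''
--     m_seq2= ''
--
--     for seq1, seq2 in permutations(seq_list, 2):
--         match=overlap(seq1, seq2)
--
--         if match>match1:
--             m_seq1= seq1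
--             m_seq2= seq2
--             match1= match
--
--     return m_seq1, m_seq2, match1
-- ===== SOURCE B (Python) =====
-- from itertools import permutations
--
-- def _overlap(s1, s2):
--     # longest k such that the length-k suffix of s1 equals the length-k prefix of s2
--     for k in range(min(len(s1), len(s2)), 0, -1):
--         if s1.endswith(s2[:k]):
--             return k
--     return 0
--
-- def max_overlap(seq_list):
--     candidates = [(a, b, _overlap(a, b)) for a, b in permutations(seq_list, 2)]
--     return max((c for c in candidates if c[2] > 0),
--                key=lambda c: c[2], default=('', '', 0))
-- ===== Notes on version B (the rewrite author's own statement) =====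
-- stated objective: simpler
-- what changed: A scans occurrences of seq2's first character with str.find and tests startswith at each position; B directly scans candidate overlap lengths downward testing endswith on a prefix slice, and picks the best pair with max(key=..., default=...) over the positive candidates instead of a hand-rolled running maximum.
import Mathlib
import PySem

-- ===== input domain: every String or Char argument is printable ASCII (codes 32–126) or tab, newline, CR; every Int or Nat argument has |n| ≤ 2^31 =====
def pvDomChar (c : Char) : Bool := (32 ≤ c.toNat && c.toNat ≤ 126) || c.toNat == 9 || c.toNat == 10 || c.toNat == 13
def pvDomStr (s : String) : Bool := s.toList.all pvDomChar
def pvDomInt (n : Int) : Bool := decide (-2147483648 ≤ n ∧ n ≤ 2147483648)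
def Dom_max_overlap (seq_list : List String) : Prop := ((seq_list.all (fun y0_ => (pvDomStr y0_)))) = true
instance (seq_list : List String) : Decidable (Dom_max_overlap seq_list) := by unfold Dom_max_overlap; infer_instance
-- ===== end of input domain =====

-- B replaces A's find/startswith scanning loop by a single descending scan over candidate
-- overlap lengths (endswith on a prefix slice) and Python's max(key=..., default=...) over the
-- positive candidates; objective: simpler (same asymptotic cost).

-- ===== PORT A =====

-- termination facts for A's `while True` find-loop (cited by `decreasing_by` of pvOverlapALoop)
lemma pvFindFrom_gt_len (s sub : List Char) (k : Nat) (h : s.length < k) :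
    PySem.Chars.findFrom s sub (k : Int) none = -1 := by
  have h0 : ¬ ((k : Int) < 0) := by omega
  simp only [PySem.Chars.findFrom, if_neg h0]
  rw [if_pos (by exact_mod_cast h)]

lemma pvFindFrom_le_len (s sub : List Char) (k : Nat) (hk : k ≤ s.length) :
    PySem.Chars.findFrom s sub (k : Int) none ≤ (s.length : Int) := by
  rw [PySem.Chars.findFrom_natCast s sub k hk]
  have := PySem.Chars.find_le_length (s.drop k) sub
  simp only [List.length_drop] at this
  split <;> omega

-- port of A's helper `overlap`: the while-loop, `position` is the loop variable
def pvOverlapALoop (seq1 seq2 : String) (position : Nat) : Int :=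
  let p := PySem.Str.findFrom seq1 (PySem.Str.slice seq2 none (some 1)) (position : Int)
  if p = -1 then 0
  else if PySem.Str.startswith seq2 (PySem.Str.slice seq1 (some p) none) then
    PySem.Str.len seq1 - p
  else pvOverlapALoop seq1 seq2 (p.toNat + 1)
termination_by seq1.toList.length + 1 - position
decreasing_by
  rename_i hne _
  simp only [PySem.Str.findFrom_eq] at *
  by_cases hpos : position ≤ seq1.toList.length
  · have hsp := PySem.Chars.findFrom_natCast_spec seq1.toList (PySem.Str.slice seq2 none (some 1)).toList position hpos hne
    have hle := pvFindFrom_le_len seq1.toList (PySem.Str.slice seq2 none (some 1)).toList position hpos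
    omega
  · exact absurd (pvFindFrom_gt_len seq1.toList (PySem.Str.slice seq2 none (some 1)).toList position (by omega)) hne

def pvOverlapA (seq1 seq2 : String) : Int := pvOverlapALoop seq1 seq2 0

-- the body of A's `for seq1, seq2 in permutations(seq_list, 2)` loop
def pvStepA (acc : String × String × Int) (pr : List String) : String × String × Int :=
  match pr with
  | [seq1, seq2] =>
    let m := pvOverlapA seq1 seq2
    if m > acc.2.2 then (seq1, seq2, m) else acc
  | _ => acc

def max_overlap (seq_list : List String) : String × String × Int :=
  (PySem.List.permutations seq_list 2).foldl pvStepA ("", "", 0)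

-- ===== PORT B =====

-- port of B's `_overlap`: `for k in range(min(len(s1), len(s2)), 0, -1)`
def pvOverlapBLoop (s1 s2 : String) (k : Nat) : Int :=
  match k with
  | 0 => 0
  | k' + 1 =>
    if PySem.Str.endswith s1 (PySem.Str.slice s2 none (some ((k' + 1 : Nat) : Int))) then
      ((k' + 1 : Nat) : Int)
    else pvOverlapBLoop s1 s2 k'

def pvOverlapB (s1 s2 : String) : Int :=
  pvOverlapBLoop s1 s2 (min s1.toList.length s2.toList.length)

-- the triple B's comprehension builds for one permutation pair
def pvTriple (pr : List String) : String × String × Int :=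
  match pr with
  | [a, b] => (a, b, pvOverlapB a b)
  | _ => ("", "", (0 : Int))

def max_overlap_alt (seq_list : List String) : String × String × Int :=
  let candidates := (PySem.List.permutations seq_list 2).map pvTriple
  PySem.List.maxD (candidates.filter (fun c => c.2.2 > 0)) (fun c => c.2.2) ("", "", 0)

-- ===== PRECONDITION & SPEC =====
def Spec_max_overlap (seq_list : List String) (out : String × String × Int) : Prop := out = max_overlap_alt seq_list
instance (seq_list : List String) (out : String × String × Int) : Decidable (Spec_max_overlap seq_list out) := by unfold Spec_max_overlap; infer_instance

-- ===== CLAIM (what is proved, stated in full; the proofs are below) =====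
def Claim_equal_max_overlap : Prop := ∀ (seq_list : List String), Dom_max_overlap seq_list → Spec_max_overlap seq_list (max_overlap seq_list)

-- ===== LEMMAS AND PROOFS =====

-- the first position of l1 whose suffix is a prefix of l2 (A's loop finds exactly this)
def pvPmin (l1 l2 : List Char) : Nat :=
  Nat.find (show ∃ p, l1.drop p <+: l2 from ⟨l1.length, by simp⟩)

lemma pvPmin_le (l1 l2 : List Char) : pvPmin l1 l2 ≤ l1.length :=
  Nat.find_le (by simp)

lemma pvPmin_spec (l1 l2 : List Char) : l1.drop (pvPmin l1 l2) <+: l2 :=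
  Nat.find_spec (show ∃ p, l1.drop p <+: l2 from ⟨l1.length, by simp⟩)

lemma pvPmin_min (l1 l2 : List Char) {p : Nat} (h : l1.drop p <+: l2) : pvPmin l1 l2 ≤ p :=
  Nat.find_le h

-- head-character fact: if the suffix at i is a nonempty prefix of l2 then l2's first char occurs at i
lemma pvTakeOne_prefix (l1 l2 : List Char) (i : Nat) (hi : i < l1.length) (hq : l1.drop i <+: l2) :
    l2.take 1 <+: l1.drop i := by
  obtain ⟨t, ht⟩ := hq
  have hlen : 1 ≤ (l1.drop i).length := by simp; omega
  have : l2.take 1 = (l1.drop i).take 1 := by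
    rw [← ht, List.take_append]
    simp
    omega
  rw [this]
  exact List.take_prefix _ _

lemma pvSliceTakeOne (s2 : String) :
    (PySem.Str.slice s2 none (some 1)).toList = s2.toList.take 1 := by
  rw [PySem.Str.toList_slice, PySem.Chars.slice_eq_listSlice,
    PySem.List.slice_to _ (by norm_num : (0:Int) ≤ 1)]
  norm_num

lemma pvOverlapALoop_eq (s1 s2 : String) :
    ∀ (n pos : Nat), s1.toList.length + 1 - pos ≤ n →
      (∀ p, p < pos → ¬ (s1.toList.drop p <+: s2.toList)) →
      pvOverlapALoop s1 s2 pos = ((s1.toList.length - pvPmin s1.toList s2.toList : Nat) : Int) := by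
  intro n
  induction n with
  | zero =>
    intro pos hn hh
    exact absurd (by rw [List.drop_length]; exact List.nil_prefix)
      (hh s1.toList.length (by omega))
  | succ n ih =>
    intro pos hn hh
    have hpos : pos ≤ s1.toList.length := by
      by_contra hc
      exact hh s1.toList.length (by omega) (by rw [List.drop_length]; exact List.nil_prefix)
    rw [pvOverlapALoop]
    simp only [PySem.Str.findFrom_eq, pvSliceTakeOne]
    by_cases hp : PySem.Chars.findFrom s1.toList (s2.toList.take 1) (pos : Int) = -1
    · rw [if_pos hp]
      have hni := (PySem.Chars.findFrom_natCast_eq_neg_one_iff s1.toList (s2.toList.take 1) pos hpos).mp hp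
      have hpm : pvPmin s1.toList s2.toList = s1.toList.length := by
        refine le_antisymm (pvPmin_le _ _) ?_
        by_contra hc
        push_neg at hc
        have hq := pvPmin_spec s1.toList s2.toList
        have hge : pos ≤ pvPmin s1.toList s2.toList := by
          by_contra hlt
          exact hh _ (by omega) hq
        have h1 : s2.toList.take 1 <+: s1.toList.drop (pvPmin s1.toList s2.toList) :=
          pvTakeOne_prefix _ _ _ hc hq
        have h2 : s1.toList.drop (pvPmin s1.toList s2.toList) <:+ s1.toList.drop pos := by
          rw [show pvPmin s1.toList s2.toList = pos + (pvPmin s1.toList s2.toList - pos) by omega,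
            ← List.drop_drop]
          exact List.drop_suffix _ _
        exact hni (h1.isInfix.trans h2.isInfix)
      rw [hpm]
      simp
    · rw [if_neg hp]
      obtain ⟨hge, hpre, hmin⟩ :=
        PySem.Chars.findFrom_natCast_spec s1.toList (s2.toList.take 1) pos hpos hp
      have hle := pvFindFrom_le_len s1.toList (s2.toList.take 1) pos hpos
      set q : Int := PySem.Chars.findFrom s1.toList (s2.toList.take 1) (pos : Int) with hqdef
      have hq0 : 0 ≤ q := le_trans (Int.natCast_nonneg pos) hge
      have hsl : (PySem.Str.slice s1 (some q) none).toList = s1.toList.drop q.toNat := by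
        rw [PySem.Str.toList_slice, PySem.Chars.slice_eq_listSlice,
          PySem.List.slice_from _ hq0]
      by_cases hsw : s1.toList.drop q.toNat <+: s2.toList
      · rw [if_pos (by
          simp only [PySem.Str.startswith_eq, hsl, PySem.Chars.startswith_iff]
          exact hsw)]
        have hpm : pvPmin s1.toList s2.toList = q.toNat := by
          refine le_antisymm (pvPmin_min _ _ hsw) ?_
          by_contra hc
          push_neg at hc
          have hq := pvPmin_spec s1.toList s2.toList
          have hgepos : pos ≤ pvPmin s1.toList s2.toList := by
            by_contra hlt
            exact hh _ (by omega) hq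
          exact hmin _ hgepos hc (pvTakeOne_prefix _ _ _ (by omega) hq)
        rw [PySem.Str.len_eq, hpm]
        omega
      · rw [if_neg (by
          simp only [PySem.Str.startswith_eq, hsl, PySem.Chars.startswith_iff]
          exact hsw)]
        refine ih (q.toNat + 1) (by omega) ?_
        intro r hr
        rcases lt_or_ge r pos with h1 | h1
        · exact hh r h1
        · rcases Nat.lt_or_ge r q.toNat with h2 | h2
          · exact fun hqr => hmin r h1 h2 (pvTakeOne_prefix _ _ _ (by omega) hqr)
          · have hrq : r = q.toNat := by omega
            rw [hrq]
            exact hsw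

lemma pvOverlapA_eq (s1 s2 : String) :
    pvOverlapA s1 s2 = ((s1.toList.length - pvPmin s1.toList s2.toList : Nat) : Int) :=
  pvOverlapALoop_eq s1 s2 (s1.toList.length + 1) 0 (by omega) (by omega)

lemma pvOverlapBLoop_eq (s1 s2 : String) (k : Nat) :
    pvOverlapBLoop s1 s2 k
      = ((Nat.findGreatest (fun j => s2.toList.take j <:+ s1.toList) k : Nat) : Int) := by
  induction k with
  | zero => simp [pvOverlapBLoop]
  | succ k ih =>
    rw [pvOverlapBLoop]
    have hsl : (PySem.Str.slice s2 none (some ((k + 1 : Nat) : Int))).toList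
        = s2.toList.take (k + 1) := by
      rw [PySem.Str.toList_slice, PySem.Chars.slice_eq_listSlice,
        PySem.List.slice_to _ (by positivity)]
      simp
    rw [Nat.findGreatest_succ]
    by_cases h : s2.toList.take (k + 1) <:+ s1.toList
    · rw [if_pos (by
        simp only [PySem.Str.endswith_eq, hsl, PySem.Chars.endswith_iff]
        exact h), if_pos h]
    · rw [if_neg (by
        simp only [PySem.Str.endswith_eq, hsl, PySem.Chars.endswith_iff]
        exact h), if_neg h, ih]

lemma pvFindGreatest_eq (l1 l2 : List Char) :
    Nat.findGreatest (fun j => l2.take j <:+ l1) (min l1.length l2.length)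
      = l1.length - pvPmin l1 l2 := by
  have hq := pvPmin_spec l1 l2
  have hpl := pvPmin_le l1 l2
  have hle2 : l1.length - pvPmin l1 l2 ≤ l2.length := by
    have := hq.length_le
    simp only [List.length_drop] at this
    omega
  have htake : l2.take (l1.length - pvPmin l1 l2) = l1.drop (pvPmin l1 l2) := by
    have he := List.prefix_iff_eq_take.mp hq
    rw [List.length_drop] at he
    exact he.symm
  have hP : l2.take (l1.length - pvPmin l1 l2) <:+ l1 := by
    rw [htake]
    exact List.drop_suffix _ _
  refine le_antisymm ?_ (Nat.le_findGreatest (by omega) hP)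
  have hgle : Nat.findGreatest (fun j => l2.take j <:+ l1) (min l1.length l2.length)
      ≤ min l1.length l2.length := Nat.findGreatest_le _
  have hPg : l2.take (Nat.findGreatest (fun j => l2.take j <:+ l1) (min l1.length l2.length)) <:+ l1 :=
    Nat.findGreatest_spec (P := fun j => l2.take j <:+ l1) (by omega) hP
  set g := Nat.findGreatest (fun j => l2.take j <:+ l1) (min l1.length l2.length) with hg
  have hglen : (l2.take g).length = g := by
    simp only [List.length_take]
    omega
  have hd := List.suffix_iff_eq_drop.mp hPg
  rw [hglen] at hd
  have hQ : l1.drop (l1.length - g) <+: l2 := by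
    rw [← hd]
    exact List.take_prefix _ _
  have := pvPmin_min l1 l2 hQ
  omega

lemma pvOverlap_eq (s1 s2 : String) : pvOverlapA s1 s2 = pvOverlapB s1 s2 := by
  rw [pvOverlapA_eq, pvOverlapB, pvOverlapBLoop_eq, pvFindGreatest_eq]

-- B's keep-first-max step (what max(key=...) does element by element)
def pvStep (acc c : String × String × Int) : String × String × Int :=
  if c.2.2 > acc.2.2 then c else acc

lemma pvStep_nonneg (acc c : String × String × Int) (h : 0 ≤ acc.2.2) :
    0 ≤ (pvStep acc c).2.2 := by
  unfold pvStep
  split <;> omega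

lemma pvFoldA_eq (ps : List (List String)) (acc : String × String × Int) (hacc : 0 ≤ acc.2.2) :
    ps.foldl pvStepA acc = (ps.map pvTriple).foldl pvStep acc := by
  induction ps generalizing acc with
  | nil => rfl
  | cons pr t ih =>
    simp only [List.foldl_cons, List.map_cons]
    have hstep : pvStepA acc pr = pvStep acc (pvTriple pr) := by
      rcases pr with _ | ⟨a, _ | ⟨b, _ | ⟨c, r⟩⟩⟩
      · simp only [pvStepA, pvTriple, pvStep]
        rw [if_neg (by omega)]
      · simp only [pvStepA, pvTriple, pvStep]
        rw [if_neg (by omega)]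
      · simp only [pvStepA, pvTriple, pvStep, pvOverlap_eq]
      · simp only [pvStepA, pvTriple, pvStep]
        rw [if_neg (by omega)]
    rw [hstep]
    exact ih _ (pvStep_nonneg acc _ hacc)

lemma pvFilter_skip (cs : List (String × String × Int)) (acc : String × String × Int)
    (hacc : 0 ≤ acc.2.2) :
    cs.foldl pvStep acc = (cs.filter (fun c => c.2.2 > 0)).foldl pvStep acc := by
  induction cs generalizing acc with
  | nil => rfl
  | cons c t ih =>
    by_cases h : c.2.2 > 0
    · rw [List.filter_cons_of_pos (by simpa using h)]
      simp only [List.foldl_cons]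
      exact ih _ (pvStep_nonneg acc _ hacc)
    · rw [List.filter_cons_of_neg (by simpa using h)]
      simp only [List.foldl_cons]
      rw [show pvStep acc c = acc from by unfold pvStep; rw [if_neg (by omega)]]
      exact ih _ hacc

lemma pvMax?_cons : ∀ (cs : List (String × String × Int)) (c : String × String × Int),
    PySem.List.max? (c :: cs) (fun x => x.2.2) = some (cs.foldl pvStep c) := by
  intro cs
  induction cs with
  | nil => intro c; rfl
  | cons d t ih =>
    intro c
    have h1 : PySem.List.max? (c :: d :: t) (fun x => x.2.2)
        = PySem.List.max? (pvStep c d :: t) (fun x => x.2.2) := by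
      simp only [PySem.List.max?, List.foldl_cons]
      congr 1
      show (if c.2.2 < d.2.2 then some d else some c) = some (pvStep c d)
      unfold pvStep
      split <;> simp_all
    rw [h1, ih]
    simp only [List.foldl_cons]

-- ===== VERDICT (by name: the statement is the Claim_ definition above) =====
theorem max_overlap_spec : Claim_equal_max_overlap := by
  intro l _
  unfold Spec_max_overlap max_overlap max_overlap_alt
  dsimp only
  rw [pvFoldA_eq _ _ (by norm_num)]
  rw [pvFilter_skip _ _ (by norm_num)]
  cases hsplit : ((PySem.List.permutations l 2).map pvTriple).filter (fun c => c.2.2 > 0) with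
  | nil => rfl
  | cons c t =>
    have hc : (0:Int) < c.2.2 := by
      have hm : c ∈ ((PySem.List.permutations l 2).map pvTriple).filter (fun c => c.2.2 > 0) := by
        rw [hsplit]
        exact List.mem_cons_self
      simpa using (List.mem_filter.mp hm).2
    simp only [List.foldl_cons, PySem.List.maxD]
    rw [pvMax?_cons]
    rw [show pvStep ("", "", (0:Int)) c = c from by unfold pvStep; rw [if_pos (by simpa using hc)]]
    rfl
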